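-- pv_equiv track=rewrite | github.com/ind1xa/opm | simetricniBlokDizajni.py | jeBalansiran
-- ===== SOURCE A (Python) =====
-- alpha = 1     #svake dvije točke skupa v nalaze se istovremeno u alpha blokova
--
-- def jeBalansiran(paroviIzV, dizajn):
--     for x in paroviIzV:
--         count = 0
--         for y in dizajn:
--             if set(x).issubset(y):
--                 count += 1
--                 if (count > alpha): return False
--         if (count != alpha): return False
--     return True
-- ===== SOURCE B (Python) =====
-- alpha = 1
--
-- def jeBalansiran(paroviIzV, dizajn):
--     # inverted index: for each point, the ascending list of block indices containing it;
--     # a pair lies in exactly the blocks in the intersection of its points' index lists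
--     incidence = {}
--     for i, y in enumerate(dizajn):
--         for v in set(y):
--             incidence.setdefault(v, []).append(i)
--     for x in paroviIzV:
--         common = None
--         for v in set(x):
--             blocks = incidence.get(v, [])
--             common = blocks if common is None else [i for i in common if i in blocks]
--         cnt = len(dizajn) if common is None else len(common)
--         if cnt != alpha:
--             return False
--     return True
-- ===== Notes on version B (the rewrite author's own statement) =====
-- stated objective: alternative
-- what changed: A rescans every block per pair counting subset containments with early exits; B builds an inverted index (point -> list of block indices) in one pass over blocks and gets each pair's block count as the size of the intersection of its points' index lists.
import Mathlib
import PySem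

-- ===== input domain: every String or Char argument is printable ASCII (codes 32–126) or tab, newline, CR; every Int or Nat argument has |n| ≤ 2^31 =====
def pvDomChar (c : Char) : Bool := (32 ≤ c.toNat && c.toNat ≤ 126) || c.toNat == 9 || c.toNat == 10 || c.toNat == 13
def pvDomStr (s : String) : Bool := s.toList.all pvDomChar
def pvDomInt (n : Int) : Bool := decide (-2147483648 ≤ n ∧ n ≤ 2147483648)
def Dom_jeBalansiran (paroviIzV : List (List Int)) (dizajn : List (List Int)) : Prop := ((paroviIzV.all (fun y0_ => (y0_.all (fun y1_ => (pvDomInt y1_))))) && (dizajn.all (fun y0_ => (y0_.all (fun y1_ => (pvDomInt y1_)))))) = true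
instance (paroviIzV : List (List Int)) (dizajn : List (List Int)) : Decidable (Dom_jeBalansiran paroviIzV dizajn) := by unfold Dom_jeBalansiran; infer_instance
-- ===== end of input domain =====

-- B replaces A's per-pair rescan of all blocks by an inverted index (point -> block
-- indices); a pair's block count is the size of the intersection of its points' index
-- lists. Alternative algorithm, same return value.

def pvAlpha : Int := 1

-- ===== PORT A =====
-- inner 'for y in dizajn' loop of A, carrying 'count'; false = an early 'return False'
def pvAInner (x : List Int) : List (List Int) → Int → Bool
  | [], count => count == pvAlpha
  | y :: rest, count =>
    if PySem.Set.issubset (PySem.Set.ofList x) y then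
      let c := count + 1
      if c > pvAlpha then false else pvAInner x rest c
    else pvAInner x rest count

def jeBalansiran (paroviIzV : List (List Int)) (dizajn : List (List Int)) : Bool :=
  match paroviIzV with
  | [] => true
  | x :: rest => if pvAInner x dizajn 0 then jeBalansiran rest dizajn else false

-- ===== PORT B =====
-- 'for i, y in enumerate(dizajn): for v in set(y): incidence.setdefault(v, []).append(i)'
def pvBuildInc : List (List Int) → Int → PySem.Dict Int (List Int) → PySem.Dict Int (List Int)
  | [], _, inc => inc
  | y :: rest, i, inc =>
      pvBuildInc rest (i + 1)
        ((PySem.Set.ofList y).foldl (fun d v => d.insert v (d.getD v [] ++ [i])) inc)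

-- 'for v in set(x): blocks = incidence.get(v, []); common = blocks if common is None else [i for i in common if i in blocks]'
-- (set(x) ported as the distinct elements in first-occurrence order; the final length,
-- all B returns, does not depend on that order)
def pvCommonLoop (inc : PySem.Dict Int (List Int)) : List Int → Option (List Int) → Option (List Int)
  | [], common => common
  | v :: rest, common =>
      let blocks := inc.getD v []
      pvCommonLoop inc rest (some (match common with
        | none => blocks
        | some c => c.filter (fun i => blocks.contains i)))

-- the 'for x in paroviIzV' loop with its early 'return False'
def pvBCheck (inc : PySem.Dict Int (List Int)) (n : Int) : List (List Int) → Bool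
  | [] => true
  | x :: rest =>
      let cnt : Int := match pvCommonLoop inc (PySem.Set.ofList x) none with
        | none => n
        | some c => (c.length : Int)
      if cnt ≠ pvAlpha then false else pvBCheck inc n rest

def jeBalansiran_alt (paroviIzV : List (List Int)) (dizajn : List (List Int)) : Bool :=
  pvBCheck (pvBuildInc dizajn 0 PySem.Dict.empty) (dizajn.length : Int) paroviIzV

-- ===== PRECONDITION & SPEC =====
def Spec_jeBalansiran (paroviIzV : List (List Int)) (dizajn : List (List Int)) (out : Bool) : Prop := out = jeBalansiran_alt paroviIzV dizajn
instance (paroviIzV : List (List Int)) (dizajn : List (List Int)) (out : Bool) : Decidable (Spec_jeBalansiran paroviIzV dizajn out) := by unfold Spec_jeBalansiran; infer_instance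

-- ===== CLAIM (what is proved, stated in full; the proofs are below) =====
def Claim_equal_jeBalansiran : Prop := ∀ (paroviIzV : List (List Int)) (dizajn : List (List Int)), Dom_jeBalansiran paroviIzV dizajn → Spec_jeBalansiran paroviIzV dizajn (jeBalansiran paroviIzV dizajn)

-- ===== LEMMAS AND PROOFS =====

-- the block indices (starting at i) whose block satisfies p
def pvIdxP (i : Int) : List (List Int) → (List Int → Bool) → List Int
  | [], _ => []
  | y :: rest, p => (if p y then [i] else []) ++ pvIdxP (i + 1) rest p

theorem pvIdxP_ge : ∀ (d : List (List Int)) (i : Int) (p : List Int → Bool) (j : Int),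
    j ∈ pvIdxP i d p → i ≤ j := by
  intro d
  induction d with
  | nil => intro i p j h; simp [pvIdxP] at h
  | cons y rest ih =>
    intro i p j h
    simp only [pvIdxP, List.mem_append] at h
    rcases h with h | h
    · split at h <;> simp at h; omega
    · have := ih (i + 1) p j h; omega

theorem pvIdxP_congr : ∀ (d : List (List Int)) (i : Int) (p q : List Int → Bool),
    (∀ y, p y = q y) → pvIdxP i d p = pvIdxP i d q := by
  intro d
  induction d with
  | nil => intro i p q _; rfl
  | cons y rest ih =>
    intro i p q h
    simp only [pvIdxP, h y, ih (i + 1) p q h]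

theorem pvIdxP_length : ∀ (d : List (List Int)) (i : Int) (p : List Int → Bool),
    (pvIdxP i d p).length = d.countP p := by
  intro d
  induction d with
  | nil => intro i p; rfl
  | cons y rest ih =>
    intro i p
    simp only [pvIdxP, List.length_append, List.countP_cons, ih (i + 1) p]
    split <;> simp <;> omega

-- intersection of index lists = index list of the conjunction
theorem pvIdxP_filter : ∀ (d : List (List Int)) (i : Int) (p q : List Int → Bool),
    (pvIdxP i d p).filter (fun j => (pvIdxP i d q).contains j)
      = pvIdxP i d (fun y => p y && q y) := by
  intro d
  induction d with
  | nil => intro i p q; rfl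
  | cons y rest ih =>
    intro i p q
    simp only [pvIdxP, List.filter_append]
    have hni : i ∉ pvIdxP (i + 1) rest q := by
      intro hc
      have := pvIdxP_ge rest (i + 1) q i hc
      omega
    have h1 : (if p y then [i] else []).filter
        (fun j => ((if q y then [i] else []) ++ pvIdxP (i + 1) rest q).contains j)
        = (if p y && q y then [i] else []) := by
      by_cases hp : p y = true
      · by_cases hqy : q y = true
        · simp [hp, hqy, List.filter]
        · rw [Bool.not_eq_true] at hqy
          simp [hp, hqy, List.filter, hni]
      · rw [Bool.not_eq_true] at hp
        simp [hp]
    have h2 : (pvIdxP (i + 1) rest p).filter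
        (fun j => ((if q y then [i] else []) ++ pvIdxP (i + 1) rest q).contains j)
        = (pvIdxP (i + 1) rest p).filter (fun j => (pvIdxP (i + 1) rest q).contains j) := by
      apply List.filter_congr
      intro j hj
      have hge := pvIdxP_ge rest (i + 1) p j hj
      have hne : j ≠ i := by omega
      by_cases hqy : q y = true
      · simp [hqy, hne]
      · rw [Bool.not_eq_true] at hqy
        simp [hqy]
    rw [h1, h2, ih (i + 1) p q]

-- one block's inner fold: appends i to the lists of exactly the keys in l (l nodup)
theorem pvFoldIns_getD : ∀ (l : List Int), l.Nodup → ∀ (inc : PySem.Dict Int (List Int)) (i w : Int),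
    ((l.foldl (fun d v => d.insert v (d.getD v [] ++ [i])) inc).getD w [])
      = inc.getD w [] ++ (if w ∈ l then [i] else []) := by
  intro l
  induction l with
  | nil => intro _ inc i w; simp
  | cons v rest ih =>
    intro hnd inc i w
    have hnd' : rest.Nodup := (List.nodup_cons.mp hnd).2
    have hv : v ∉ rest := (List.nodup_cons.mp hnd).1
    simp only [List.foldl_cons]
    rw [ih hnd' _ i w]
    rw [PySem.Dict.getD_insert]
    by_cases hwv : w = v
    · subst hwv
      have : w ∉ rest := hv
      simp [this]
    · simp only [if_neg hwv]
      by_cases hwr : w ∈ rest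
      · simp [hwr, hwv]
      · simp [hwr, hwv]

-- the inverted index characterized: getD v = indices of blocks containing v
theorem pvBuildInc_getD : ∀ (d : List (List Int)) (i : Int) (inc : PySem.Dict Int (List Int)) (w : Int),
    (pvBuildInc d i inc).getD w []
      = inc.getD w [] ++ pvIdxP i d (fun y => decide (w ∈ y)) := by
  intro d
  induction d with
  | nil => intro i inc w; simp [pvBuildInc, pvIdxP]
  | cons y rest ih =>
    intro i inc w
    simp only [pvBuildInc]
    rw [ih (i + 1) _ w, pvFoldIns_getD (PySem.Set.ofList y) (PySem.Set.nodup_ofList y) inc i w]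
    have : (if w ∈ PySem.Set.ofList y then [i] else []) = (if decide (w ∈ y) = true then [i] else []) := by
      by_cases h : w ∈ y <;> simp [PySem.Set.mem_ofList, h]
    rw [this]
    simp [pvIdxP]

-- the intersection loop over the pair's points, from an accumulated index list
theorem pvCommonLoop_some (d : List (List Int)) :
    ∀ (vs : List Int) (p : List Int → Bool),
      pvCommonLoop (pvBuildInc d 0 PySem.Dict.empty) vs (some (pvIdxP 0 d p))
        = some (pvIdxP 0 d (fun y => p y && vs.all (fun v => decide (v ∈ y)))) := by
  intro vs
  induction vs with
  | nil =>
    intro p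
    simp only [pvCommonLoop]
    congr 1
    apply pvIdxP_congr
    intro y; simp
  | cons v rest ih =>
    intro p
    simp only [pvCommonLoop]
    have hblocks : (pvBuildInc d 0 PySem.Dict.empty).getD v [] = pvIdxP 0 d (fun y => decide (v ∈ y)) := by
      rw [pvBuildInc_getD]; simp
    rw [hblocks, pvIdxP_filter, ih (fun y => p y && decide (v ∈ y))]
    congr 1
    apply pvIdxP_congr
    intro y
    simp [List.all_cons, Bool.and_assoc]

-- issubset against a block = all points of the pair lie in the block
theorem pvIssubset_all (s y : List Int) :
    PySem.Set.issubset s y = s.all (fun v => decide (v ∈ y)) := by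
  by_cases h : PySem.Set.issubset s y = true
  · rw [h, eq_comm, List.all_eq_true]
    rw [PySem.Set.issubset_iff] at h
    intro v hv; simpa using h v hv
  · rw [Bool.not_eq_true] at h
    rw [h, eq_comm, Bool.eq_false_iff, ne_eq, List.all_eq_true]
    intro hc
    apply absurd _ (Bool.eq_false_iff.mp h)
    rw [PySem.Set.issubset_iff]
    intro v hv; simpa using hc v hv

-- the count B computes for one pair = the number of blocks containing the pair
theorem pvCnt (d : List (List Int)) (x : List Int) :
    (match pvCommonLoop (pvBuildInc d 0 PySem.Dict.empty) (PySem.Set.ofList x) none with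
      | none => (d.length : Int)
      | some c => (c.length : Int))
    = (d.countP (fun y => PySem.Set.issubset (PySem.Set.ofList x) y) : Int) := by
  cases hx : PySem.Set.ofList x with
  | nil =>
    simp only [pvCommonLoop]
    have hlen : d.countP (fun y => PySem.Set.issubset ([] : List Int) y) = d.length := by
      rw [List.countP_eq_length]
      intro y _
      rfl
    rw [hlen]
  | cons v vs =>
    simp only [pvCommonLoop]
    have hblocks : (pvBuildInc d 0 PySem.Dict.empty).getD v [] = pvIdxP 0 d (fun y => decide (v ∈ y)) := by
      rw [pvBuildInc_getD]; simp
    rw [hblocks, pvCommonLoop_some d vs (fun y => decide (v ∈ y))]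
    simp only [pvIdxP_length]
    congr 1
    apply List.countP_congr
    intro y _
    rw [pvIssubset_all, List.all_cons]

-- A's inner loop computes: count plus the number of blocks containing x equals alpha
theorem pvAInner_eq (x : List Int) : ∀ (d : List (List Int)) (c : Int),
    pvAInner x d c
      = ((c + (d.countP (fun y => PySem.Set.issubset (PySem.Set.ofList x) y) : Int)) == pvAlpha) := by
  intro d
  induction d with
  | nil => intro c; simp [pvAInner]
  | cons y rest ih =>
    intro c
    by_cases h : PySem.Set.issubset (PySem.Set.ofList x) y = true
    · rw [List.countP_cons]
      simp only [h, if_true]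
      by_cases hc : c + 1 > pvAlpha
      · simp only [pvAInner, h, if_true, hc]
        have hnn := Int.natCast_nonneg (rest.countP (fun y => PySem.Set.issubset (PySem.Set.ofList x) y))
        rw [eq_comm, Bool.eq_false_iff, ne_eq, beq_iff_eq]
        simp [pvAlpha] at hc ⊢
        omega
      · simp only [pvAInner, h, if_true, hc, if_false, ih (c + 1)]
        have : c + 1 + (rest.countP (fun y => PySem.Set.issubset (PySem.Set.ofList x) y) : Int)
             = c + ((rest.countP (fun y => PySem.Set.issubset (PySem.Set.ofList x) y) : Int) + 1) := by
          ring
        rw [this]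
        rfl
    · rw [Bool.not_eq_true] at h
      simp [pvAInner, h, ih c]

-- both outer loops, pair by pair
theorem pvMain (d : List (List Int)) : ∀ (p : List (List Int)),
    jeBalansiran p d = pvBCheck (pvBuildInc d 0 PySem.Dict.empty) (d.length : Int) p := by
  intro p
  induction p with
  | nil => rfl
  | cons x rest ih =>
    have hx : pvAInner x d 0
        = ((d.countP (fun y => PySem.Set.issubset (PySem.Set.ofList x) y) : Int) == pvAlpha) := by
      rw [pvAInner_eq]; norm_num
    simp only [jeBalansiran, pvBCheck, pvCnt d x, hx, ih]
    by_cases h : (d.countP (fun y => PySem.Set.issubset (PySem.Set.ofList x) y) : Int) = pvAlpha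
    · simp [h]
    · simp [h]

-- ===== VERDICT (by name: the statement is the Claim_ definition above) =====
theorem jeBalansiran_spec : Claim_equal_jeBalansiran := by
  intro p d _
  show jeBalansiran p d = jeBalansiran_alt p d
  rw [pvMain d p]
  rfl
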